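-- pv_equiv track=rewrite | github.com/benny1232123/Stocks-Master | Frequently-Used-Program/Stock-Selection-CCTV-Sectors.py | _match_sectors
-- ===== SOURCE A (Python) =====
-- def _match_sectors(text, sector_keywords):
--     txt = text.lower()
--     matched = []
--     for sector, kws in sector_keywords.items():
--         hits = [k for k in kws if k and k.lower() in txt]
--         if hits:
--             matched.append((sector, hits))
--     return matched
-- ===== SOURCE B (Python) =====
-- def _match_sectors(text, sector_keywords):
--     # Index the text once: build the set of all its substrings of the needed
--     # lengths, then each keyword test is a single set lookup.
--     txt = text.lower()
--     n = len(txt)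
--     lengths = {len(k) for kws in sector_keywords.values() for k in kws if k}
--     grams = {txt[i:i + L] for L in lengths for i in range(n - L + 1)}
--     matched = []
--     for sector, kws in sector_keywords.items():
--         hits = [k for k in kws if k and k.lower() in grams]
--         if hits:
--             matched.append((sector, hits))
--     return matched
-- ===== Notes on version B (the rewrite author's own statement) =====
-- stated objective: alternative
-- what changed: Instead of scanning the text once per keyword with 'in', B indexes the text once: it collects the distinct keyword lengths, builds the set of all text substrings of those lengths, and each keyword test becomes a single set lookup.
import Mathlib
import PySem

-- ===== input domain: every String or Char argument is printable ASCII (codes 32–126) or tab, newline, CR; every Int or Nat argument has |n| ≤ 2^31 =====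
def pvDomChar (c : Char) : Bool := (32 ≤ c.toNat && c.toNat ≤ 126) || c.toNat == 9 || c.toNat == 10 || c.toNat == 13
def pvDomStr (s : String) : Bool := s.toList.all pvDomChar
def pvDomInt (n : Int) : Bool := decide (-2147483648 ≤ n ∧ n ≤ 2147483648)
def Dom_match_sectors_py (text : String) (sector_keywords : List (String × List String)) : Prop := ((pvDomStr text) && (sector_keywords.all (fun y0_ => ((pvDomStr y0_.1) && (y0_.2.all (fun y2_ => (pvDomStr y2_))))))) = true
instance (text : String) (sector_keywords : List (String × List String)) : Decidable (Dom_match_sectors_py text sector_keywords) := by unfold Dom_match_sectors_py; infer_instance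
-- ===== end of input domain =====

-- B replaces the per-keyword substring scan of the text by one precomputed set of all
-- text substrings of the keyword lengths, turning each keyword test into a set lookup.

-- ===== PORT A =====
-- literal transliteration of A: lower the text, then for each (sector, kws) keep the
-- keywords that are truthy and whose lowercase form is a substring of the text.
def match_sectors_py (text : String) (sector_keywords : List (String × List String)) : List (String × List String) :=
  let txt := PySem.Str.lower text
  sector_keywords.foldl
    (fun matched p =>
      let hits := p.2.filter (fun k => (k != "") && PySem.Str.isIn (PySem.Str.lower k) txt)
      if hits.isEmpty then matched else matched ++ [(p.1, hits)])
    []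

-- ===== PORT B =====
-- transliteration of Source B; the lowered text is handled as its character list (the PySem
-- string primitives are defined on List Char), its slices txt[i:i+L] via PySem.List.slice.
def match_sectors_py_alt (text : String) (sector_keywords : List (String × List String)) : List (String × List String) :=
  let txt := (PySem.Str.lower text).toList
  let n : Int := (txt.length : Int)
  let lengths : PySem.Set Int :=
    PySem.Set.ofList
      (((sector_keywords.flatMap (fun p => p.2)).filter (fun k => k != "")).map
        (fun k => PySem.Str.len k))
  let grams : PySem.Set (List Char) :=
    PySem.Set.ofList
      (lengths.flatMap (fun L =>
        (PySem.List.pyRange 0 (n - L + 1) 1).map (fun i =>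
          PySem.List.slice txt (some i) (some (i + L)))))
  sector_keywords.foldl
    (fun matched p =>
      let hits : List String := p.2.filter (fun k => (k != "") && PySem.Set.contains grams (PySem.Str.lower k).toList)
      if hits.isEmpty then matched else matched ++ [(p.1, hits)])
    []

-- ===== PRECONDITION & SPEC =====
def Spec_match_sectors_py (text : String) (sector_keywords : List (String × List String)) (out : List (String × List String)) : Prop := out = match_sectors_py_alt text sector_keywords
instance (text : String) (sector_keywords : List (String × List String)) (out : List (String × List String)) : Decidable (Spec_match_sectors_py text sector_keywords out) := by unfold Spec_match_sectors_py; infer_instance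

-- ===== CLAIM (what is proved, stated in full; the proofs are below) =====
def Claim_equal_match_sectors_py : Prop := ∀ (text : String) (sector_keywords : List (String × List String)), Dom_match_sectors_py text sector_keywords → Spec_match_sectors_py text sector_keywords (match_sectors_py text sector_keywords)

-- ===== LEMMAS AND PROOFS =====

-- membership in the gram set equals substring containment, for a nonempty pattern
-- whose (nonnegative) length is one of the collected lengths
lemma contains_grams_eq_isIn (txt g : List Char) (lengths : List Int)
    (hpos : ∀ L ∈ lengths, 0 ≤ L)
    (hg : g ≠ []) (hL : (g.length : Int) ∈ lengths) :
    (PySem.Set.ofList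
      (lengths.flatMap (fun L =>
        (PySem.List.pyRange 0 ((txt.length : Int) - L + 1) 1).map (fun i =>
          PySem.List.slice txt (some i) (some (i + L)))))).contains g
      = PySem.Chars.isIn g txt := by
  have hg1 : 1 ≤ g.length := by
    cases g with
    | nil => exact absurd rfl hg
    | cons a t => simp
  by_cases h : PySem.Chars.isIn g txt = true
  · rw [h, PySem.Set.contains_iff, PySem.Set.mem_ofList]
    obtain ⟨j, hpre⟩ := (PySem.Chars.exists_prefix_drop_iff_isIn g txt).mpr h
    have hlen : g.length ≤ txt.length - j := by
      have := hpre.length_le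
      simpa using this
    refine List.mem_flatMap.mpr ⟨(g.length : Int), hL,
      List.mem_map.mpr ⟨(j : Int), ?_, ?_⟩⟩
    · refine PySem.List.mem_pyRange_one.mpr ⟨by positivity, ?_⟩
      have : j + g.length ≤ txt.length := by omega
      omega
    · rw [PySem.List.slice_natCast_add txt j g.length]
      exact (List.prefix_iff_eq_take.mp hpre).symm
  · rw [eq_false_of_ne_true h, Bool.eq_false_iff]
    intro hc
    apply h
    rw [PySem.Set.contains_iff, PySem.Set.mem_ofList] at hc
    obtain ⟨L, hLmem, hmem⟩ := List.mem_flatMap.mp hc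
    obtain ⟨i, hi, hslice⟩ := List.mem_map.mp hmem
    obtain ⟨hi0, _⟩ := PySem.List.mem_pyRange_one.mp hi
    have hb : (0 : Int) ≤ i + L := by have := hpos L hLmem; omega
    rw [PySem.List.slice_toNat txt hi0 hb] at hslice
    refine (PySem.Chars.exists_prefix_drop_iff_isIn g txt).mp ⟨i.toNat, ?_⟩
    rw [← hslice]
    exact List.take_prefix _ _

-- all collected lengths are nonnegative
lemma lengths_nonneg (sector_keywords : List (String × List String)) :
    ∀ L ∈ (((sector_keywords.flatMap (fun p => p.2)).filter (fun k => k != "")).map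
        (fun k => PySem.Str.len k)), 0 ≤ L := by
  intro L hLm
  obtain ⟨k, _, hk⟩ := List.mem_map.mp hLm
  rw [← hk]
  simp [PySem.Str.len]

-- for a nonempty keyword of the input, its lowered length is among the collected lengths
lemma len_mem_lengths (sector_keywords : List (String × List String))
    (p : String × List String) (k : String)
    (hp : p ∈ sector_keywords) (hk : k ∈ p.2) (hne : (k != "") = true) :
    (((PySem.Str.lower k).toList.length : Int)) ∈
      (((sector_keywords.flatMap (fun p => p.2)).filter (fun k => k != "")).map
        (fun k => PySem.Str.len k)) := by
  have hlen : (((PySem.Str.lower k).toList.length : Int)) = PySem.Str.len k := by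
    simp [PySem.Str.len, PySem.Str.toList_lower, PySem.Chars.lower]
  rw [hlen]
  exact List.mem_map.mpr ⟨k, List.mem_filter.mpr ⟨List.mem_flatMap.mpr ⟨p, hp, hk⟩, hne⟩, rfl⟩

-- ===== VERDICT (by name: the statement is the Claim_ definition above) =====
theorem match_sectors_py_spec : Claim_equal_match_sectors_py := by
  intro text sector_keywords _
  unfold Spec_match_sectors_py match_sectors_py match_sectors_py_alt
  simp only
  apply PySem.List.foldl_congr_mem
  intro acc p hp
  have hfilter : p.2.filter
      (fun k => (k != "") && PySem.Str.isIn (PySem.Str.lower k) (PySem.Str.lower text)) =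
      p.2.filter (fun k => (k != "") &&
        (PySem.Set.ofList
          ((PySem.Set.ofList
            (((sector_keywords.flatMap (fun p => p.2)).filter (fun k => k != "")).map
              (fun k => PySem.Str.len k))).flatMap (fun L =>
            (PySem.List.pyRange 0 (((PySem.Str.lower text).toList.length : Int) - L + 1) 1).map
              (fun i =>
                PySem.List.slice (PySem.Str.lower text).toList
                  (some i) (some (i + L)))))).contains
          (PySem.Str.lower k).toList) := by
    apply List.filter_congr
    intro k hk
    by_cases hne : (k != "") = true
    · rw [hne, Bool.true_and, Bool.true_and]
      have hgne : (PySem.Str.lower k).toList ≠ [] := by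
        have : k.toList ≠ [] := by
          simpa using (by simpa using hne : k ≠ "")
        simpa [PySem.Str.toList_lower, PySem.Chars.lower] using this
      have hmem : (((PySem.Str.lower k).toList.length : Int)) ∈
          ((PySem.Set.ofList
            (((sector_keywords.flatMap (fun p => p.2)).filter (fun k => k != "")).map
              (fun k => PySem.Str.len k))) : List Int) :=
        PySem.Set.mem_ofList _ _ |>.mpr (len_mem_lengths sector_keywords p k hp hk hne)
      have hpos : ∀ L ∈ ((PySem.Set.ofList
            (((sector_keywords.flatMap (fun p => p.2)).filter (fun k => k != "")).map
              (fun k => PySem.Str.len k))) : List Int), 0 ≤ L := by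
        intro L hLm
        exact lengths_nonneg sector_keywords L ((PySem.Set.mem_ofList _ _).mp hLm)
      rw [contains_grams_eq_isIn (PySem.Str.lower text).toList (PySem.Str.lower k).toList
        _ hpos hgne hmem]
      simp
    · rw [Bool.not_eq_true] at hne
      rw [hne, Bool.false_and, Bool.false_and]
  rw [hfilter]
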